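-- pv_equiv track=rewrite | github.com/pypi-data/pypi-mirror-317 | packages/xython/xython-3.3.1.tar.gz/xython-3.3.1/src/xython/youtil.py | change_two_list_2d_to_one_list_2d_with_same_len
-- ===== SOURCE A (Python) =====
-- def change_two_list_2d_to_one_list_2d_with_same_len(input_list_2d_1, input_list_2d_2):
-- 	"""
-- 	선택한 영역이 2개를 서로 같은것을 기준으로 묶을려고하는것이다
-- 	제일앞의 한줄이 같은것이다
-- 	만약 묶을려고 할때 자료가 없을때는 그 기준자료만큼 빈자료를 넣어서 다음자료를 추가하는 것이다
--
-- 	:param input_list_2d_1: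
-- 	:param input_list_2d_2:
-- 	:return:
-- 	"""
-- 	no_of_list_2d_1 = len(input_list_2d_1[0]) - 1
-- 	no_of_list_2d_2 = len(input_list_2d_2[0]) - 1
-- 	empty_list_2d_1 = [""] * no_of_list_2d_1
-- 	empty_list_2d_2 = [""] * no_of_list_2d_2
-- 	# 리스트형태로는 코드가 더 길어질것으로 보여서 입력자료를 사전으로 변경 한것
-- 	temp_dic = {}
-- 	for one in input_list_2d_1:
-- 		temp_dic[one[0]] = one[1:]
-- 	checked_list = []
-- 	# 기준이 되는 자료에 항목이 있을때
-- 	for one in input_list_2d_2: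
-- 		if one[0] in temp_dic.keys():
-- 			temp_dic[one[0]] = list(temp_dic[one[0]]) + list(one[1:])
-- 		else:
-- 			temp_dic[one[0]] = empty_list_2d_1 + list(one[1:])
-- 		checked_list.append(one[0])
-- 	# 기준자료에 항목이 없는것에 대한것
-- 	for one in temp_dic.keys():
-- 		if not one in checked_list:
-- 			temp_dic[one] = list(temp_dic[one]) + empty_list_2d_2
-- 	# 사전형식을 리스트로 다시 만드는것
-- 	result = []
-- 	for one in temp_dic:
-- 		result.append([one] + list(temp_dic[one]))
-- 	return result
-- ===== SOURCE B (Python) =====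
-- def change_two_list_2d_to_one_list_2d_with_same_len(input_list_2d_1, input_list_2d_2):
--     empty_list_2d_1 = [""] * (len(input_list_2d_1[0]) - 1)
--     empty_list_2d_2 = [""] * (len(input_list_2d_2[0]) - 1)
--     # ordered distinct keys of each table (first appearance)
--     keys1 = []
--     for row in input_list_2d_1:
--         if row[0] not in keys1:
--             keys1.append(row[0])
--     keys2 = []
--     for row in input_list_2d_2:
--         if row[0] not in keys2:
--             keys2.append(row[0])
--     result = []
--     # keys of table 1, padded with table-2 data (or blanks) gathered by direct rescans
--     for k in keys1:
--         left = []
--         for row in input_list_2d_1: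
--             if row[0] == k:
--                 left = row[1:]          # last occurrence wins
--         right = []
--         found = False
--         for row in input_list_2d_2:
--             if row[0] == k:
--                 right = right + row[1:]  # all occurrences accumulate
--                 found = True
--         result.append([k] + left + (right if found else empty_list_2d_2))
--     # keys only in table 2
--     for k in keys2:
--         if k not in keys1:
--             right = []
--             for row in input_list_2d_2:
--                 if row[0] == k:
--                     right = right + row[1:]
--             result.append([k] + empty_list_2d_1 + right)
--     return result
-- ===== Notes on version B (the rewrite author's own statement) =====
-- stated objective: alternative
-- what changed: B uses no dictionaries at all: it deduplicates the first-column keys of each table into two ordered key lists and then, for each key, rescans the inputs directly (last matching tail from list1, all matching tails concatenated from list2), instead of A's incrementally patched dict with a checked-list membership scan and a gap-fill loop.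
import Mathlib
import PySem

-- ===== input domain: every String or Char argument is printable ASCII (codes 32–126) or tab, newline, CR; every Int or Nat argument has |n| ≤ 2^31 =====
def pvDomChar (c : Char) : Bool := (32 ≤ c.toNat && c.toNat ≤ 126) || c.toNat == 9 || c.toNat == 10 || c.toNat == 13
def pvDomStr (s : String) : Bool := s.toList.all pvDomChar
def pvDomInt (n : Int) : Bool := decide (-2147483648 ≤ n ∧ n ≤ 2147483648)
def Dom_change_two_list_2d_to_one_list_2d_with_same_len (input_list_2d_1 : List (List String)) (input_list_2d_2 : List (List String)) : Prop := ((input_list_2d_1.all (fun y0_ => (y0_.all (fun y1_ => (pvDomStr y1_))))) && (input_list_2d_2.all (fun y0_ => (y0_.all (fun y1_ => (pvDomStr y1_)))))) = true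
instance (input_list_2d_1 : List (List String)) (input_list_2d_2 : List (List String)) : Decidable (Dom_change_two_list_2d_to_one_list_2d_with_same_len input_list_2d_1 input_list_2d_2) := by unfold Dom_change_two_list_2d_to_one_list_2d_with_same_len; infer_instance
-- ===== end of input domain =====

-- B drops A's dict/checked-list bookkeeping entirely: it deduplicates the first-column keys of each
-- table into two ordered key lists and, for each key, rescans the inputs directly (last matching
-- tail from list1, all matching tails from list2); objective: alternative. Return-value equivalence only.

-- ===== PORT A =====
def change_two_list_2d_to_one_list_2d_with_same_len (input_list_2d_1 : List (List String)) (input_list_2d_2 : List (List String)) : List (List String) :=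
  let empty1 : List String := List.replicate ((input_list_2d_1.headD []).length - 1) ""
  let empty2 : List String := List.replicate ((input_list_2d_2.headD []).length - 1) ""
  let d0 : PySem.Dict String (List String) :=
    input_list_2d_1.foldl (fun d one => d.insert (one.headD "") one.tail) PySem.Dict.empty
  let st : PySem.Dict String (List String) × List String :=
    input_list_2d_2.foldl (fun p one =>
      ((if p.1.contains (one.headD "") then
          p.1.insert (one.headD "") (p.1.getD (one.headD "") [] ++ one.tail)
        else
          p.1.insert (one.headD "") (empty1 ++ one.tail)), p.2 ++ [one.headD ""])) (d0, ([] : List String))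
  let d2 : PySem.Dict String (List String) :=
    st.1.keys.foldl (fun d k => if st.2.contains k then d else d.insert k (d.getD k [] ++ empty2)) st.1
  d2.keys.foldl (fun r k => r ++ [k :: d2.getD k []]) []

-- ===== PORT B =====
def change_two_list_2d_to_one_list_2d_with_same_len_alt (input_list_2d_1 : List (List String)) (input_list_2d_2 : List (List String)) : List (List String) :=
  let empty1 : List String := List.replicate ((input_list_2d_1.headD []).length - 1) ""
  let empty2 : List String := List.replicate ((input_list_2d_2.headD []).length - 1) ""
  let keys1 : List String :=
    input_list_2d_1.foldl (fun ks row => if ks.contains (row.headD "") then ks else ks ++ [row.headD ""]) []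
  let keys2 : List String :=
    input_list_2d_2.foldl (fun ks row => if ks.contains (row.headD "") then ks else ks ++ [row.headD ""]) []
  let r1 : List (List String) :=
    keys1.foldl (fun res k =>
      let left : List String :=
        input_list_2d_1.foldl (fun acc row => if row.headD "" == k then row.tail else acc) []
      let st : List String × Bool :=
        input_list_2d_2.foldl (fun p row => if row.headD "" == k then (p.1 ++ row.tail, true) else p)
          (([] : List String), false)
      res ++ [k :: (left ++ (if st.2 then st.1 else empty2))]) []
  keys2.foldl (fun res k =>
    if keys1.contains k then res else
      let right : List String :=
        input_list_2d_2.foldl (fun acc row => if row.headD "" == k then acc ++ row.tail else acc) []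
      res ++ [k :: (empty1 ++ right)]) r1

-- ===== PRECONDITION & SPEC =====
-- Pre_ excludes exactly the inputs on which Python A raises IndexError: an empty outer list
-- (input_list_2d_1[0] / input_list_2d_2[0]) or an empty row (one[0]).
def Pre_change_two_list_2d_to_one_list_2d_with_same_len (input_list_2d_1 : List (List String)) (input_list_2d_2 : List (List String)) : Prop :=
  input_list_2d_1 ≠ [] ∧ input_list_2d_2 ≠ [] ∧
  (∀ r ∈ input_list_2d_1, r ≠ []) ∧ (∀ r ∈ input_list_2d_2, r ≠ [])
instance (input_list_2d_1 : List (List String)) (input_list_2d_2 : List (List String)) : Decidable (Pre_change_two_list_2d_to_one_list_2d_with_same_len input_list_2d_1 input_list_2d_2) := by unfold Pre_change_two_list_2d_to_one_list_2d_with_same_len; infer_instance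

def pvWitness_change_two_list_2d_to_one_list_2d_with_same_len : List (List String) × List (List String) :=
  ([["a", "1"], ["b", "2"]], [["b", "x"], ["c", "y"]])

def Spec_change_two_list_2d_to_one_list_2d_with_same_len (input_list_2d_1 : List (List String)) (input_list_2d_2 : List (List String)) (out : List (List String)) : Prop := out = change_two_list_2d_to_one_list_2d_with_same_len_alt input_list_2d_1 input_list_2d_2
instance (input_list_2d_1 : List (List String)) (input_list_2d_2 : List (List String)) (out : List (List String)) : Decidable (Spec_change_two_list_2d_to_one_list_2d_with_same_len input_list_2d_1 input_list_2d_2 out) := by unfold Spec_change_two_list_2d_to_one_list_2d_with_same_len; infer_instance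

-- ===== CLAIM (what is proved, stated in full; the proofs are below) =====
def Claim_equal_change_two_list_2d_to_one_list_2d_with_same_len : Prop := ∀ (input_list_2d_1 : List (List String)) (input_list_2d_2 : List (List String)), Dom_change_two_list_2d_to_one_list_2d_with_same_len input_list_2d_1 input_list_2d_2 → Pre_change_two_list_2d_to_one_list_2d_with_same_len input_list_2d_1 input_list_2d_2 → Spec_change_two_list_2d_to_one_list_2d_with_same_len input_list_2d_1 input_list_2d_2 (change_two_list_2d_to_one_list_2d_with_same_len input_list_2d_1 input_list_2d_2)

-- ===== LEMMAS AND PROOFS =====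

-- A's phase-2 loop step (dict component), B's dic2-equivalent accumulation step, and the
-- abstraction of the merged value per key.
def pvStep1 (e1 : List String) (d : PySem.Dict String (List String)) (one : List String) : PySem.Dict String (List String) :=
  if d.contains (one.headD "") then
    d.insert (one.headD "") (d.getD (one.headD "") [] ++ one.tail)
  else
    d.insert (one.headD "") (e1 ++ one.tail)

def pvGStep (d : PySem.Dict String (List String)) (one : List String) : PySem.Dict String (List String) :=
  d.modify (one.headD "") [] (· ++ one.tail)

def pvDval (D1 G : PySem.Dict String (List String)) (e1 : List String) (k : String) : List String :=
  if D1.contains k then D1.getD k [] ++ G.getD k []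
  else if G.contains k then e1 ++ G.getD k [] else []

-- The dict of l1 rows (last wins) and the per-key accumulation dict of l2 rows.
def pvD1 (l1 : List (List String)) : PySem.Dict String (List String) :=
  l1.foldl (fun d one => d.insert (one.headD "") one.tail) PySem.Dict.empty

def pvG2 (l2 : List (List String)) : PySem.Dict String (List String) :=
  l2.foldl pvGStep PySem.Dict.empty

-- Common normal form both programs are reduced to.
def pvNF (l1 l2 : List (List String)) : List (List String) :=
  let e1 : List String := List.replicate ((l1.headD []).length - 1) ""
  let e2 : List String := List.replicate ((l2.headD []).length - 1) ""
  ((pvD1 l1).keys.map (fun k => k :: ((pvD1 l1).getD k [] ++ (if (pvG2 l2).contains k then (pvG2 l2).getD k [] else e2))))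
  ++ (((pvG2 l2).keys.filter (fun k => !((pvD1 l1).contains k))).map (fun k => k :: (e1 ++ (pvG2 l2).getD k [])))

-- A's pair fold splits into the dict fold and checked_list = the heads of the rows.
lemma pvPairSplit (e1 : List String) (l : List (List String)) (d : PySem.Dict String (List String)) (c : List String) :
    (l.foldl (fun p one =>
      ((if p.1.contains (one.headD "") then
          p.1.insert (one.headD "") (p.1.getD (one.headD "") [] ++ one.tail)
        else
          p.1.insert (one.headD "") (e1 ++ one.tail)), p.2 ++ [one.headD ""])) (d, c))
    = (l.foldl (pvStep1 e1) d, c ++ l.map (fun one => one.headD "")) := by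
  induction l generalizing d c with
  | nil => simp
  | cons one rest ih =>
    simp only [List.foldl_cons, List.map_cons, ih, pvStep1]
    simp

-- Main phase-2 invariant: A's dict tracks pvD1 and pvG2 pointwise and in key order.
lemma pvInvMain (e1 : List String) (D1 : PySem.Dict String (List String))
    (l : List (List String)) (d G : PySem.Dict String (List String))
    (hG : G.keys.Nodup)
    (hK : d.keys = D1.keys ++ G.keys.filter (fun k => !(D1.contains k)))
    (hv : ∀ k, d.getD k [] = pvDval D1 G e1 k) :
    (l.foldl (pvStep1 e1) d).keys
        = D1.keys ++ (l.foldl pvGStep G).keys.filter (fun k => !(D1.contains k)) ∧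
    (∀ k, (l.foldl (pvStep1 e1) d).getD k [] = pvDval D1 (l.foldl pvGStep G) e1 k) := by
  induction l generalizing d G with
  | nil => exact ⟨hK, hv⟩
  | cons one rest ih =>
    simp only [List.foldl_cons]
    set h := one.headD "" with hh
    have hdc : d.contains h = (D1.contains h || G.contains h) := by
      by_cases h1 : D1.contains h = true
      · have : h ∈ d.keys := by
          rw [hK]; exact List.mem_append_left _ ((PySem.Dict.contains_iff_mem_keys _ _).mp h1)
        rw [(PySem.Dict.contains_iff_mem_keys _ _).mpr this, h1]; simp
      · by_cases h2 : G.contains h = true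
        · have : h ∈ d.keys := by
            rw [hK]
            refine List.mem_append_right _ ?_
            rw [List.mem_filter]
            exact ⟨(PySem.Dict.contains_iff_mem_keys _ _).mp h2, by simp [h1]⟩
          rw [(PySem.Dict.contains_iff_mem_keys _ _).mpr this, h2]; simp
        · have : ¬ h ∈ d.keys := by
            rw [hK]
            intro hm
            rcases List.mem_append.mp hm with hm1 | hm2
            · exact h1 ((PySem.Dict.contains_iff_mem_keys _ _).mpr hm1)
            · exact h2 ((PySem.Dict.contains_iff_mem_keys _ _).mpr ((List.mem_filter.mp hm2).1))
          have : d.contains h = false := by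
            cases hc : d.contains h
            · rfl
            · exact absurd ((PySem.Dict.contains_iff_mem_keys _ _).mp hc) this
          rw [this]
          simp [Bool.not_eq_true] at h1 h2
          rw [h1, h2]; rfl
    have hG1keys : (pvGStep G one).keys = if G.contains h then G.keys else G.keys ++ [h] := by
      rw [pvGStep, PySem.Dict.keys_modify]
      by_cases hg : G.contains h = true
      · rw [PySem.Dict.keys_insert_of_contains _ _ hg, if_pos hg]
      · have hg' : G.contains h = false := by simpa using hg
        rw [PySem.Dict.keys_insert_of_not_contains _ _ hg', if_neg hg]
    have hG1nodup : (pvGStep G one).keys.Nodup := by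
      rw [hG1keys]
      by_cases hg : G.contains h = true
      · rwa [if_pos hg]
      · have hg' : G.contains h = false := by simpa using hg
        rw [if_neg hg]
        have hnm : h ∉ G.keys := fun hm => by
          rw [(PySem.Dict.contains_iff_mem_keys _ _).mpr hm] at hg'; simp at hg'
        have hall : ∀ a ∈ G.keys, ¬ a = h := fun a ha hE => hnm (hE ▸ ha)
        simp [List.nodup_append, hG]
        exact hall
    have hG1c : ∀ k, (pvGStep G one).contains k = (k == h || G.contains k) := fun k =>
      PySem.Dict.contains_modify _ _ _ _ _
    have hG1v : ∀ k, (pvGStep G one).getD k [] = if k = h then G.getD h [] ++ one.tail else G.getD k [] := by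
      intro k
      rw [pvGStep, PySem.Dict.getD_modify]
    have hK' : (pvStep1 e1 d one).keys = D1.keys ++ (pvGStep G one).keys.filter (fun k => !(D1.contains k)) := by
      rw [pvStep1, ← hh]
      by_cases hc : d.contains h = true
      · rw [if_pos hc, PySem.Dict.keys_insert_of_contains _ _ hc, hK, hG1keys]
        rw [hdc] at hc
        by_cases hg : G.contains h = true
        · rw [if_pos hg]
        · have hg' : G.contains h = false := by simpa using hg
          rw [if_neg hg]
          have hd1 : D1.contains h = true := by
            rw [hg'] at hc; simpa using hc
          rw [List.filter_append]
          simp [hd1]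
      · have hc' : d.contains h = false := by simpa using hc
        rw [if_neg hc, PySem.Dict.keys_insert_of_not_contains _ _ hc', hK, hG1keys]
        rw [hdc] at hc'
        have hd1 : D1.contains h = false := by
          cases hx : D1.contains h
          · rfl
          · rw [hx] at hc'; simp at hc'
        have hg : G.contains h = false := by
          cases hx : G.contains h
          · rfl
          · rw [hx] at hc'; simp at hc'
        rw [if_neg (by simp [hg])]
        rw [List.filter_append]
        simp [hd1, List.append_assoc]
    refine (ih (pvStep1 e1 d one) (pvGStep G one) hG1nodup hK' ?_)
    intro k
    by_cases hk : k = h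
    · subst hk
      rw [pvStep1, ← hh]
      by_cases hc : d.contains h = true
      · rw [if_pos hc, PySem.Dict.getD_insert]
        rw [if_pos rfl]
        rw [hv h, pvDval, pvDval]
        rw [hdc] at hc
        by_cases hd1 : D1.contains h = true
        · rw [if_pos hd1, if_pos hd1, hG1v, if_pos rfl, List.append_assoc]
        · have hd1' : D1.contains h = false := by simpa using hd1
          have hg : G.contains h = true := by
            rw [hd1'] at hc; simpa using hc
          rw [if_neg hd1, if_neg hd1, if_pos hg, hG1v, if_pos rfl]
          have : (pvGStep G one).contains h = true := by rw [hG1c]; simp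
          rw [if_pos this, List.append_assoc]
      · have hc' : d.contains h = false := by simpa using hc
        rw [if_neg hc, PySem.Dict.getD_insert, if_pos rfl]
        rw [hdc] at hc'
        have hd1 : D1.contains h = false := by
          cases hx : D1.contains h
          · rfl
          · rw [hx] at hc'; simp at hc'
        have hg : G.contains h = false := by
          cases hx : G.contains h
          · rfl
          · rw [hx] at hc'; simp at hc'
        rw [pvDval, if_neg (by simp [hd1])]
        have : (pvGStep G one).contains h = true := by rw [hG1c]; simp
        rw [if_pos this, hG1v, if_pos rfl, PySem.Dict.getD_of_not_contains _ _ hg]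
        simp
    · rw [pvStep1, ← hh]
      have hne : k ≠ h := hk
      have hgetd : ∀ v, (d.insert h v).getD k [] = d.getD k [] := by
        intro v; rw [PySem.Dict.getD_insert, if_neg hne]
      by_cases hc : d.contains h = true
      · rw [if_pos hc, hgetd, hv k, pvDval, pvDval, hG1v, if_neg hne]
        have : (pvGStep G one).contains k = G.contains k := by
          rw [hG1c]; simp [hne]
        rw [this]
      · rw [if_neg hc, hgetd, hv k, pvDval, pvDval, hG1v, if_neg hne]
        have : (pvGStep G one).contains k = G.contains k := by
          rw [hG1c]; simp [hne]
        rw [this]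

-- A's gap-fill loop: keys unchanged, values get empty2 appended exactly on the unchecked keys.
lemma pvPhase3 (e2 : List String) (checked : List String)
    (ks : List String) (d : PySem.Dict String (List String))
    (hnd : ks.Nodup) (hmem : ∀ k ∈ ks, d.contains k = true) :
    (ks.foldl (fun d k => if checked.contains k then d else d.insert k (d.getD k [] ++ e2)) d).keys = d.keys ∧
    (∀ k, (ks.foldl (fun d k => if checked.contains k then d else d.insert k (d.getD k [] ++ e2)) d).getD k []
        = if k ∈ ks ∧ checked.contains k = false then d.getD k [] ++ e2 else d.getD k []) := by
  induction ks generalizing d with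
  | nil => simp
  | cons k0 rest ih =>
    simp only [List.foldl_cons]
    have hk0 : d.contains k0 = true := hmem k0 (by simp)
    have hnd' : rest.Nodup := (List.nodup_cons.mp hnd).2
    have hk0nm : k0 ∉ rest := (List.nodup_cons.mp hnd).1
    set d1 := if checked.contains k0 then d else d.insert k0 (d.getD k0 [] ++ e2) with hd1
    have hkeys1 : d1.keys = d.keys := by
      rw [hd1]
      by_cases hc : checked.contains k0 = true
      · rw [if_pos hc]
      · rw [if_neg hc, PySem.Dict.keys_insert_of_contains _ _ hk0]
    have hc1 : ∀ k, d1.contains k = d.contains k := by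
      intro k
      cases hck : d.contains k
      · have : ¬ k ∈ d.keys := fun hm => by
          rw [(PySem.Dict.contains_iff_mem_keys _ _).mpr hm] at hck; simp at hck
        cases hx : d1.contains k
        · rfl
        · exact absurd ((PySem.Dict.contains_iff_mem_keys _ _).mp hx) (hkeys1 ▸ this)
      · exact (PySem.Dict.contains_iff_mem_keys _ _).mpr
          (hkeys1 ▸ ((PySem.Dict.contains_iff_mem_keys _ _).mp hck))
    have hmem' : ∀ k ∈ rest, d1.contains k = true := fun k hk => by
      rw [hc1]; exact hmem k (by simp [hk])
    obtain ⟨ihk, ihv⟩ := ih d1 hnd' hmem'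
    constructor
    · rw [ihk, hkeys1]
    · intro k
      rw [ihv k]
      by_cases hk : k = k0
      · subst hk
        have hgd1 : d1.getD k [] = if checked.contains k = true then d.getD k [] else d.getD k [] ++ e2 := by
          rw [hd1]
          by_cases hc : checked.contains k = true
          · rw [if_pos hc, if_pos hc]
          · rw [if_neg hc, if_neg hc, PySem.Dict.getD_insert, if_pos rfl]
        rw [if_neg (by simp [hk0nm])]
        by_cases hc : checked.contains k = true
        · rw [hgd1, if_pos hc, if_neg (fun hx => by rw [hc] at hx; exact absurd hx.2 (by simp))]
        · have hc' : checked.contains k = false := by simpa using hc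
          rw [hgd1, if_neg hc, if_pos ⟨by simp, hc'⟩]
      · have hgd1 : d1.getD k [] = d.getD k [] := by
          rw [hd1]
          by_cases hc : checked.contains k0 = true
          · rw [if_pos hc]
          · rw [if_neg hc, PySem.Dict.getD_insert, if_neg hk]
        rw [hgd1]
        by_cases hr : k ∈ rest ∧ checked.contains k = false
        · rw [if_pos hr, if_pos ⟨by simp [hr.1], hr.2⟩]
        · rw [if_neg hr, if_neg (by
            intro hx
            exact hr ⟨by rcases List.mem_cons.mp hx.1 with h1 | h2; exact absurd h1 hk; exact h2, hx.2⟩)]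

-- Assembling A's final dict-to-list pass into the normal form.
lemma pvAssembleKeys (e1 e2 : List String) (checked : List String)
    (D1 G2 d1 d2 : PySem.Dict String (List String))
    (hcheckG : ∀ k, checked.contains k = G2.contains k)
    (hkeys : d1.keys = D1.keys ++ G2.keys.filter (fun k => !(D1.contains k)))
    (hval : ∀ k, d1.getD k [] = pvDval D1 G2 e1 k)
    (h3k : d2.keys = d1.keys)
    (h3v : ∀ k, d2.getD k [] = if k ∈ d1.keys ∧ checked.contains k = false then d1.getD k [] ++ e2 else d1.getD k []) :
    d2.keys.map (fun k => k :: d2.getD k []) =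
      D1.keys.map (fun k => k :: (D1.getD k [] ++ (if G2.contains k then G2.getD k [] else e2)))
        ++ (G2.keys.filter (fun k => !(D1.contains k))).map (fun k => k :: (e1 ++ G2.getD k [])) := by
  rw [h3k, hkeys, List.map_append]
  congr 1
  · apply List.map_congr_left
    intro k hk
    have hkd1 : k ∈ d1.keys := by rw [hkeys]; exact List.mem_append_left _ hk
    have hD1c : D1.contains k = true := (PySem.Dict.contains_iff_mem_keys _ _).mpr hk
    rw [h3v k]
    cases hg : G2.contains k
    · have hch : checked.contains k = false := by rw [hcheckG, hg]
      rw [if_pos ⟨hkd1, hch⟩, hval k, pvDval, if_pos hD1c,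
        PySem.Dict.getD_of_not_contains _ _ hg]
      simp
    · have hch : checked.contains k = true := by rw [hcheckG, hg]
      rw [if_neg (fun hx => by rw [hch] at hx; exact absurd hx.2 (by simp)),
        hval k, pvDval, if_pos hD1c]
      simp
  · apply List.map_congr_left
    intro k hk
    have hkG : k ∈ G2.keys := (List.mem_filter.mp hk).1
    have hD1c : D1.contains k = false := by
      have := (List.mem_filter.mp hk).2; simpa using this
    have hkd1 : k ∈ d1.keys := by
      rw [hkeys]
      exact List.mem_append_right _ hk
    have hG2c : G2.contains k = true := (PySem.Dict.contains_iff_mem_keys _ _).mpr hkG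
    have hch : checked.contains k = true := by rw [hcheckG, hG2c]
    rw [h3v k, if_neg (fun hx => by rw [hch] at hx; exact absurd hx.2 (by simp)),
      hval k, pvDval, if_neg (by simp [hD1c]), if_pos hG2c]

-- A reduces to the normal form.
lemma pvAeqNF (l1 l2 : List (List String)) :
    change_two_list_2d_to_one_list_2d_with_same_len l1 l2 = pvNF l1 l2 := by
  unfold change_two_list_2d_to_one_list_2d_with_same_len pvNF
  simp only []
  rw [pvPairSplit]
  simp only [List.nil_append]
  simp only [PySem.List.foldl_append_singleton_eq_map, List.nil_append]
  set e1 : List String := List.replicate ((l1.headD []).length - 1) "" with he1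
  set e2 : List String := List.replicate ((l2.headD []).length - 1) "" with he2
  set checked : List String := l2.map (fun one => one.headD "") with hchecked
  set d1 : PySem.Dict String (List String) := l2.foldl (pvStep1 e1) (pvD1 l1) with hd1def
  have hD1nodup : (pvD1 l1).keys.Nodup :=
    PySem.Dict.nodup_keys_foldl_insert_key l1 (fun one => one.headD "") (fun _ one => one.tail) _ PySem.Dict.nodup_keys_empty
  have hG2keys : (pvG2 l2).keys = PySem.Set.ofList checked := by
    rw [pvG2, hchecked]
    have := PySem.Dict.keys_foldl_modify_key (ν := List String) l2 (fun one => one.headD "") []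
      (fun _ one => (· ++ one.tail)) PySem.Dict.empty
    rw [PySem.Dict.keys_empty] at this
    rw [show (fun (d : PySem.Dict String (List String)) (one : List String) => d.modify (one.headD "") [] (· ++ one.tail)) = pvGStep from rfl] at this
    rw [this, PySem.Set.update_nil_left]
  have hG2nodup : (pvG2 l2).keys.Nodup := by rw [hG2keys]; exact PySem.Set.nodup_ofList _
  have hcheckG : ∀ k, checked.contains k = (pvG2 l2).contains k := by
    intro k
    have h1 : checked.contains k = true ↔ k ∈ checked := List.contains_iff_mem
    have h2 : (pvG2 l2).contains k = true ↔ k ∈ checked := by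
      rw [PySem.Dict.contains_iff_mem_keys, hG2keys, PySem.Set.mem_ofList]
    cases hx : checked.contains k
    · cases hy : (pvG2 l2).contains k
      · rfl
      · exact absurd (h1.mpr (h2.mp hy)) (by rw [hx]; exact Bool.false_ne_true)
    · rw [h2.mpr (h1.mp hx)]
  obtain ⟨hkeys, hval⟩ := pvInvMain e1 (pvD1 l1) l2 (pvD1 l1) PySem.Dict.empty PySem.Dict.nodup_keys_empty
    (by simp [PySem.Dict.keys_empty])
    (by
      intro k
      rw [pvDval]
      by_cases hc : (pvD1 l1).contains k = true
      · rw [if_pos hc, PySem.Dict.getD_empty, List.append_nil]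
      · have hc' : (pvD1 l1).contains k = false := by simpa using hc
        rw [if_neg hc, PySem.Dict.contains_empty, if_neg (by simp),
          PySem.Dict.getD_of_not_contains _ _ hc'])
  have hkeys' : d1.keys = (pvD1 l1).keys ++ (pvG2 l2).keys.filter (fun k => !((pvD1 l1).contains k)) := hkeys
  have hval' : ∀ k, d1.getD k [] = pvDval (pvD1 l1) (pvG2 l2) e1 k := hval
  have hd1nodup : d1.keys.Nodup := by
    rw [hkeys']
    refine List.Nodup.append hD1nodup (hG2nodup.filter _) ?_
    intro a ha hb
    have := (List.mem_filter.mp hb).2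
    simp only [Bool.not_eq_true'] at this
    exact absurd ((PySem.Dict.contains_iff_mem_keys _ _).mpr ha) (by simp [this])
  obtain ⟨h3k, h3v⟩ := pvPhase3 e2 checked d1.keys d1 hd1nodup
    (fun k hk => (PySem.Dict.contains_iff_mem_keys _ _).mpr hk)
  exact pvAssembleKeys e1 e2 checked (pvD1 l1) (pvG2 l2) d1 _ hcheckG hkeys' hval' h3k h3v

-- B's last-wins rescan of l1 computes pvD1's lookup.
lemma pvLastScan (l : List (List String)) (d : PySem.Dict String (List String)) (k : String) :
    (l.foldl (fun d one => d.insert (one.headD "") one.tail) d).getD k [] =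
      l.foldl (fun acc row => if row.headD "" == k then row.tail else acc) (d.getD k []) := by
  induction l generalizing d with
  | nil => rfl
  | cons one rest ih =>
    simp only [List.foldl_cons, ih, PySem.Dict.getD_insert]
    by_cases hk : k = one.headD ""
    · rw [if_pos hk, if_pos (by simp [hk])]
    · have hne : one.headD "" ≠ k := fun h => hk h.symm
      rw [if_neg hk, if_neg (by simp only [beq_iff_eq]; exact hne)]

-- B's accumulating rescan of l2 computes pvG2's lookup.
lemma pvAccScan (l : List (List String)) (d : PySem.Dict String (List String)) (k : String) :
    (l.foldl pvGStep d).getD k [] =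
      l.foldl (fun acc row => if row.headD "" == k then acc ++ row.tail else acc) (d.getD k []) := by
  induction l generalizing d with
  | nil => rfl
  | cons one rest ih =>
    simp only [List.foldl_cons, ih, pvGStep, PySem.Dict.getD_modify]
    by_cases hk : k = one.headD ""
    · rw [if_pos hk, if_pos (by simp [hk]), hk]
    · have hne : one.headD "" ≠ k := fun h => hk h.symm
      rw [if_neg hk, if_neg (by simp only [beq_iff_eq]; exact hne)]

-- B's (value, found) pair fold splits into the value scan and an any-test.
lemma pvPairScan (l : List (List String)) (k : String) (a : List String) (b : Bool) :
    l.foldl (fun p row => if row.headD "" == k then (p.1 ++ row.tail, true) else p) (a, b) =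
      (l.foldl (fun acc row => if row.headD "" == k then acc ++ row.tail else acc) a,
       b || l.any (fun row => row.headD "" == k)) := by
  induction l generalizing a b with
  | nil => simp
  | cons one rest ih =>
    simp only [List.foldl_cons, List.any_cons]
    by_cases hk : one.headD "" = k
    · have hb : (one.headD "" == k) = true := by simp only [beq_iff_eq]; exact hk
      rw [if_pos hb, ih, if_pos hb, hb]
      simp
    · have hb : (one.headD "" == k) = false := by simp only [beq_eq_false_iff_ne, ne_eq]; exact hk
      rw [if_neg (by rw [hb]; exact Bool.false_ne_true), ih, if_neg (by rw [hb]; exact Bool.false_ne_true), hb]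
      simp

-- found ↔ the key occurs among l2's heads ↔ pvG2 contains it.
lemma pvAnyContains (l : List (List String)) (k : String) :
    (pvG2 l).contains k = l.any (fun row => row.headD "" == k) := by
  have hkeys : (pvG2 l).keys = PySem.Set.ofList (l.map (fun one => one.headD "")) := by
    rw [pvG2]
    have := PySem.Dict.keys_foldl_modify_key (ν := List String) l (fun one => one.headD "") []
      (fun _ one => (· ++ one.tail)) PySem.Dict.empty
    rw [PySem.Dict.keys_empty] at this
    rw [show (fun (d : PySem.Dict String (List String)) (one : List String) => d.modify (one.headD "") [] (· ++ one.tail)) = pvGStep from rfl] at this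
    rw [this, PySem.Set.update_nil_left]
  have h1 : (pvG2 l).contains k = true ↔ k ∈ l.map (fun one => one.headD "") := by
    rw [PySem.Dict.contains_iff_mem_keys, hkeys, PySem.Set.mem_ofList]
  have h2 : l.any (fun row => row.headD "" == k) = true ↔ k ∈ l.map (fun one => one.headD "") := by
    rw [List.any_eq_true, List.mem_map]
    constructor
    · rintro ⟨row, hm, he⟩; exact ⟨row, hm, by simpa using he⟩
    · rintro ⟨row, hm, he⟩; exact ⟨row, hm, by simpa using he⟩
  cases hx : l.any (fun row => row.headD "" == k)
  · cases hy : (pvG2 l).contains k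
    · rfl
    · exact absurd (h2.mpr (h1.mp hy)) (by rw [hx]; exact Bool.false_ne_true)
  · rw [h1.mpr (h2.mp hx)]

-- B's ordered dedup loop over heads = the key list of the corresponding dict.
lemma pvDedupHeads (l : List (List String)) :
    l.foldl (fun ks row => if ks.contains (row.headD "") then ks else ks ++ [row.headD ""]) [] =
      PySem.Set.ofList (l.map (fun one => one.headD "")) := by
  rw [← PySem.Set.update_nil_left, PySem.Set.update_map_eq_foldl_add]
  rfl

lemma pvD1keys (l : List (List String)) :
    (pvD1 l).keys = PySem.Set.ofList (l.map (fun one => one.headD "")) := by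
  rw [pvD1]
  rw [PySem.Dict.keys_foldl_insert_key l (fun one => one.headD "") (fun _ one => one.tail) PySem.Dict.empty]
  rw [PySem.Dict.keys_empty, PySem.Set.update_nil_left]

lemma pvG2keys (l : List (List String)) :
    (pvG2 l).keys = PySem.Set.ofList (l.map (fun one => one.headD "")) := by
  rw [pvG2]
  have := PySem.Dict.keys_foldl_modify_key (ν := List String) l (fun one => one.headD "") []
    (fun _ one => (· ++ one.tail)) PySem.Dict.empty
  rw [PySem.Dict.keys_empty] at this
  rw [show (fun (d : PySem.Dict String (List String)) (one : List String) => d.modify (one.headD "") [] (· ++ one.tail)) = pvGStep from rfl] at this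
  rw [this, PySem.Set.update_nil_left]

-- B reduces to the normal form.
lemma pvBeqNF (l1 l2 : List (List String)) :
    change_two_list_2d_to_one_list_2d_with_same_len_alt l1 l2 = pvNF l1 l2 := by
  unfold change_two_list_2d_to_one_list_2d_with_same_len_alt pvNF
  simp only []
  rw [pvDedupHeads l1, pvDedupHeads l2, ← pvD1keys, ← pvG2keys]
  set e1 : List String := List.replicate ((l1.headD []).length - 1) "" with he1
  set e2 : List String := List.replicate ((l2.headD []).length - 1) "" with he2
  rw [PySem.List.foldl_append_singleton_eq_map, List.nil_append]
  have hflip : (fun (res : List (List String)) (k : String) =>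
      if (pvD1 l1).keys.contains k then res else
        res ++ [k :: (e1 ++ l2.foldl (fun acc row => if row.headD "" == k then acc ++ row.tail else acc) [])])
      = (fun res k => if (!(pvD1 l1).keys.contains k) = true then
          res ++ [k :: (e1 ++ l2.foldl (fun acc row => if row.headD "" == k then acc ++ row.tail else acc) [])] else res) := by
    funext res k; cases hc : (pvD1 l1).keys.contains k <;> simp
  rw [hflip, PySem.List.foldl_append_if]
  have hcontains : ∀ k, (pvD1 l1).keys.contains k = (pvD1 l1).contains k := by
    intro k
    cases hx : (pvD1 l1).contains k
    · cases hy : (pvD1 l1).keys.contains k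
      · rfl
      · exact absurd ((PySem.Dict.contains_iff_mem_keys _ _).mpr (List.contains_iff_mem.mp hy))
          (by rw [hx]; exact Bool.false_ne_true)
    · exact List.contains_iff_mem.mpr ((PySem.Dict.contains_iff_mem_keys _ _).mp hx)
  congr 1
  · apply List.map_congr_left
    intro k hk
    rw [pvPairScan]
    have hleft : l1.foldl (fun acc row => if row.headD "" == k then row.tail else acc) [] = (pvD1 l1).getD k [] := by
      rw [pvD1, pvLastScan, PySem.Dict.getD_empty]
    have hright : l2.foldl (fun acc row => if row.headD "" == k then acc ++ row.tail else acc) [] = (pvG2 l2).getD k [] := by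
      rw [pvG2, pvAccScan, PySem.Dict.getD_empty]
    rw [hleft, hright, Bool.false_or, ← pvAnyContains]
  · have hfilter : (pvG2 l2).keys.filter (fun k => !(pvD1 l1).keys.contains k)
        = (pvG2 l2).keys.filter (fun k => !(pvD1 l1).contains k) := by
      apply List.filter_congr
      intro k _
      rw [hcontains]
    rw [hfilter]
    apply List.map_congr_left
    intro k _
    rw [pvG2, pvAccScan, PySem.Dict.getD_empty]

-- ===== VERDICT (by name: the statement is the Claim_ definition above) =====
theorem change_two_list_2d_to_one_list_2d_with_same_len_spec : Claim_equal_change_two_list_2d_to_one_list_2d_with_same_len := by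
  intro l1 l2 _ _
  unfold Spec_change_two_list_2d_to_one_list_2d_with_same_len
  rw [pvAeqNF, pvBeqNF]
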